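-- pv_equiv track=rewrite | github.com/anderssonlab/DeepCompARE | PPI_MED/archived_network_analysis.py | create_tf_community_members_dict
-- ===== SOURCE A (Python) =====
-- def create_tf_community_members_dict(ppi):
--     """
--     ppi: a list of communities
--     return a dictionary of TFs and their community partners
--     """
--     tf_community_members=dict()
--     for community in ppi:
--         for tf in community:
--             if tf not in tf_community_members:
--                 tf_community_members[tf]=set()
--             tf_community_members[tf]=tf_community_members[tf].union(community)
--             tf_community_members[tf].remove(tf)
--     return tf_community_members
-- ===== SOURCE B (Python) =====
-- def create_tf_community_members_dict(ppi):
--     # Pass 1: inverted index -- each TF maps to the list of (sets of) communities it occurs in.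
--     index = {}
--     for community in ppi:
--         members = set(community)
--         for tf in community:
--             index.setdefault(tf, []).append(members)
--     # Pass 2: per TF, union its communities and drop the TF itself.
--     return {tf: set().union(*comms).difference([tf]) for tf, comms in index.items()}
-- ===== Notes on version B (the rewrite author's own statement) =====
-- stated objective: alternative
-- what changed: Replaces A's single double loop that incrementally unions-and-removes inside the dict with a two-pass group-then-reduce: first an inverted index TF -> list of its communities (as sets), then one reduction per TF taking the union of those sets minus the TF itself.
import Mathlib
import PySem

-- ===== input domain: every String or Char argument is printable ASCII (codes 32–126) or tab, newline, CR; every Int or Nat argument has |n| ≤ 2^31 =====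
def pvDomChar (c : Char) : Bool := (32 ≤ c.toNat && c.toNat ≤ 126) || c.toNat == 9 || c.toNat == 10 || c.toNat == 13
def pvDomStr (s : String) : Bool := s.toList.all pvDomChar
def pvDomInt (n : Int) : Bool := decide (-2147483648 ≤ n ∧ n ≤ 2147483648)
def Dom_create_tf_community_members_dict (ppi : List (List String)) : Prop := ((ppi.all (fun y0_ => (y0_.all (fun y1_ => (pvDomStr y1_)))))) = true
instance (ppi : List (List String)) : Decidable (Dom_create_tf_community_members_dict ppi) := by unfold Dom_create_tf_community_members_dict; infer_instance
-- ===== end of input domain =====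

-- B re-implements A as a two-pass group-then-reduce (inverted index, then one union per TF) instead of
-- A's incremental union-and-remove inside a double loop; same cost, different decomposition (objective: alternative).

-- ===== PORT A =====
-- inner body of A's double loop: setdefault-to-empty-set, then union with the community and remove tf.
-- Python's .remove(tf) never raises here (tf ∈ community ⊆ union), so Set.discard is exact.
def pvStepA (community : List String) (d : PySem.Dict String (PySem.Set String)) (tf : String) :
    PySem.Dict String (PySem.Set String) :=
  let d := if d.contains tf then d else d.insert tf PySem.Set.empty
  d.insert tf (PySem.Set.discard (PySem.Set.union (d.getD tf PySem.Set.empty) community) tf)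

def create_tf_community_members_dict (ppi : List (List String)) : List (String × List String) :=
  (ppi.foldl (fun d community => community.foldl (pvStepA community) d) PySem.Dict.empty).items

-- ===== PORT B =====
-- inner body of B's first pass: index.setdefault(tf, []).append(members)
def pvStepB (members : PySem.Set String) (ix : PySem.Dict String (List (PySem.Set String))) (tf : String) :
    PySem.Dict String (List (PySem.Set String)) :=
  ix.modify tf [] (fun l => l ++ [members])

-- the value of B's dict comprehension at one item: set().union(*comms).difference([tf])
def pvGroupVal (p : String × List (PySem.Set String)) : String × List String :=
  (p.1, PySem.Set.diff (p.2.foldl PySem.Set.union PySem.Set.empty) (PySem.Set.ofList [p.1]))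

-- B's dict comprehension iterates index.items(), whose keys are distinct, so the resulting
-- dict IS the mapped association list.
def create_tf_community_members_dict_alt (ppi : List (List String)) : List (String × List String) :=
  let index : PySem.Dict String (List (PySem.Set String)) :=
    ppi.foldl (fun ix community => community.foldl (pvStepB (PySem.Set.ofList community)) ix)
      PySem.Dict.empty
  index.items.map pvGroupVal

-- ===== PRECONDITION & SPEC =====
def Spec_create_tf_community_members_dict (ppi : List (List String)) (out : List (String × List String)) : Prop := out = create_tf_community_members_dict_alt ppi
instance (ppi : List (List String)) (out : List (String × List String)) : Decidable (Spec_create_tf_community_members_dict ppi out) := by unfold Spec_create_tf_community_members_dict; infer_instance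

-- ===== CLAIM (what is proved, stated in full; the proofs are below) =====
def Claim_equal_create_tf_community_members_dict : Prop := ∀ (ppi : List (List String)), Dom_create_tf_community_members_dict ppi → Spec_create_tf_community_members_dict ppi (create_tf_community_members_dict ppi)

-- ===== LEMMAS AND PROOFS =====

-- s.difference([x]) = s.discard(x)
theorem pv_diff_singleton (s : PySem.Set String) (x : String) :
    PySem.Set.diff s (PySem.Set.ofList [x]) = PySem.Set.discard s x := by
  simp only [PySem.Set.diff, PySem.Set.discard, PySem.Set.ofList, PySem.Set.empty]
  refine List.filter_congr (fun y _ => ?_)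
  cases h : y == x <;> simp_all

theorem pv_discard_add (s : PySem.Set String) (x tf : String) :
    PySem.Set.discard (s.add x) tf =
      if x = tf then PySem.Set.discard s tf else (PySem.Set.discard s tf).add x := by
  by_cases hx : x = tf <;>
    by_cases hm : x ∈ s <;>
      simp_all [PySem.Set.add, PySem.Set.discard, List.filter_append, List.mem_filter]

theorem pv_discard_update (u : PySem.Set String) (c : List String) (tf : String) :
    PySem.Set.discard (u.update c) tf =
      (PySem.Set.discard u tf).update (c.filter (fun y => !(y == tf))) := by
  induction c generalizing u with
  | nil => simp [PySem.Set.update]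
  | cons x xs ih =>
      rw [PySem.Set.update_cons, ih, List.filter_cons]
      by_cases hx : x = tf
      · simp [hx, pv_discard_add]
      · simp [hx, pv_discard_add, PySem.Set.update_cons]

theorem pv_discard_discard (u : PySem.Set String) (tf : String) :
    PySem.Set.discard (PySem.Set.discard u tf) tf = PySem.Set.discard u tf := by
  simp [PySem.Set.discard, List.filter_filter]

theorem pv_add_of_mem (s : PySem.Set String) (x : String) (h : x ∈ s) : s.add x = s := by
  simp [PySem.Set.add, h]

theorem pv_update_ofList (s : PySem.Set String) (c : List String) :
    s.update (PySem.Set.ofList c) = s.update c := by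
  induction c using List.reverseRecOn with
  | nil => rfl
  | append_singleton xs x ih =>
      rw [PySem.Set.ofList_append_singleton]
      by_cases hm : x ∈ PySem.Set.ofList xs
      · rw [pv_add_of_mem _ _ hm, ih, PySem.Set.update_append]
        have hx : x ∈ s.update xs := by
          rw [PySem.Set.mem_update]; right; exact (PySem.Set.mem_ofList xs x).mp hm
        show s.update xs = (s.update xs).add x
        exact (pv_add_of_mem _ _ hx).symm
      · have hx : x ∉ PySem.Set.ofList xs := hm
        rw [show (PySem.Set.ofList xs).add x = PySem.Set.ofList xs ++ [x] by
              simp [PySem.Set.add, hx]]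
        rw [PySem.Set.update_append, PySem.Set.update_append, ih]

-- the one-step value algebra: remove tf, union a community, remove tf again
-- equals union the (deduplicated) community first, then remove tf once.
theorem pv_val_step (u : PySem.Set String) (c : List String) (tf : String) :
    PySem.Set.discard (PySem.Set.union (PySem.Set.discard u tf) c) tf =
      PySem.Set.discard (PySem.Set.union u (PySem.Set.ofList c)) tf := by
  show PySem.Set.discard ((PySem.Set.discard u tf).update c) tf
      = PySem.Set.discard (u.update (PySem.Set.ofList c)) tf
  rw [pv_update_ofList, pv_discard_update, pv_discard_update, pv_discard_discard]

theorem pv_keys_eq (dA : PySem.Dict String (PySem.Set String))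
    (dB : PySem.Dict String (List (PySem.Set String)))
    (h : dA.items = dB.items.map pvGroupVal) : dA.keys = dB.keys := by
  simp [PySem.Dict.keys, h, List.map_map, Function.comp, pvGroupVal]

theorem pv_stepA_eq (c : List String) (d : PySem.Dict String (PySem.Set String)) (tf : String) :
    pvStepA c d tf =
      d.insert tf (PySem.Set.discard (PySem.Set.union (d.getD tf PySem.Set.empty) c) tf) := by
  unfold pvStepA
  by_cases hc : d.contains tf
  · simp [hc]
  · have hcB : d.contains tf = false := by simpa using hc
    simp only [hcB, Bool.false_eq_true, if_false]
    rw [PySem.Dict.insert_insert_self,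
        PySem.Dict.getD_of_not_contains d PySem.Set.empty hcB,
        PySem.Dict.getD_insert_self]

theorem pv_inv_step (c : List String) (tf : String)
    (dA : PySem.Dict String (PySem.Set String))
    (dB : PySem.Dict String (List (PySem.Set String)))
    (h1 : dB.keys.Nodup) (h2 : dA.items = dB.items.map pvGroupVal) :
    (pvStepB (PySem.Set.ofList c) dB tf).keys.Nodup ∧
      (pvStepA c dA tf).items = (pvStepB (PySem.Set.ofList c) dB tf).items.map pvGroupVal := by
  have hkeys := pv_keys_eq dA dB h2
  have hndA : dA.keys.Nodup := hkeys ▸ h1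
  have hcontains : dA.contains tf = dB.contains tf := by
    rw [PySem.Dict.contains_eq_decide_mem_keys, PySem.Dict.contains_eq_decide_mem_keys, hkeys]
  have hstepB : pvStepB (PySem.Set.ofList c) dB tf
      = dB.insert tf (dB.getD tf [] ++ [PySem.Set.ofList c]) := by
    simp [pvStepB, PySem.Dict.modify]
  rw [pv_stepA_eq, hstepB]
  by_cases hc : dB.contains tf = true
  case neg =>
    have hcB : dB.contains tf = false := by simpa using hc
    have hcA : dA.contains tf = false := by rw [hcontains, hcB]
    constructor
    · exact PySem.Dict.nodup_keys_insert dB tf _ h1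
    · rw [PySem.Dict.items_insert_of_not_contains dA _ hcA,
          PySem.Dict.items_insert_of_not_contains dB _ hcB,
          PySem.Dict.getD_of_not_contains dA PySem.Set.empty hcA,
          PySem.Dict.getD_of_not_contains dB [] hcB, h2, List.map_append]
      have hv := pv_val_step ([] : PySem.Set String) c tf
      rw [show PySem.Set.discard ([] : PySem.Set String) tf = [] from rfl] at hv
      simp [pvGroupVal, pv_diff_singleton, hv]
  case pos =>
    -- tf is already a key: obtain its stored list of communities
    obtain ⟨p, hpmem, hp1⟩ : ∃ p ∈ dB.items, p.1 = tf := by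
      have : tf ∈ dB.keys := (PySem.Dict.contains_iff_mem_keys dB tf).mp hc
      simp only [PySem.Dict.keys, List.mem_map] at this
      obtain ⟨p, hp, h⟩ := this; exact ⟨p, hp, h⟩
    obtain ⟨comms, rfl⟩ : ∃ comms, p = (tf, comms) := ⟨p.2, by rw [← hp1]⟩
    have hgB : dB.getD tf [] = comms := PySem.Dict.getD_of_mem_items dB hpmem h1 []
    have hgA : dA.getD tf PySem.Set.empty
        = PySem.Set.discard (comms.foldl PySem.Set.union PySem.Set.empty) tf := by
      have hmemA : (tf, PySem.Set.diff (comms.foldl PySem.Set.union PySem.Set.empty)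
          (PySem.Set.ofList [tf])) ∈ dA.items := by
        rw [h2]; exact List.mem_map.mpr ⟨(tf, comms), hpmem, rfl⟩
      rw [PySem.Dict.getD_of_mem_items dA hmemA hndA, pv_diff_singleton]
    have hcA : dA.contains tf = true := by rw [hcontains, hc]
    have hval : PySem.Set.discard (PySem.Set.union (dA.getD tf PySem.Set.empty) c) tf
        = (pvGroupVal (tf, comms ++ [PySem.Set.ofList c])).2 := by
      rw [hgA, pv_val_step]
      simp only [pvGroupVal, pv_diff_singleton, List.foldl_append, List.foldl_cons, List.foldl_nil]
    constructor
    · exact PySem.Dict.nodup_keys_insert dB tf _ h1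
    · rw [PySem.Dict.items_insert_of_contains dA _ hcA,
          PySem.Dict.items_insert_of_contains dB _ hc, hgB, h2, List.map_map, List.map_map]
      refine List.map_congr_left (fun q _ => ?_)
      simp only [Function.comp]
      by_cases hq : q.1 = tf
      · simp only [pvGroupVal, hq, beq_self_eq_true, if_true, hval]
      · simp [pvGroupVal, hq]

theorem pv_inv_inner (c : List String) (c' : List String)
    (dA : PySem.Dict String (PySem.Set String))
    (dB : PySem.Dict String (List (PySem.Set String)))
    (h1 : dB.keys.Nodup) (h2 : dA.items = dB.items.map pvGroupVal) :
    (c'.foldl (pvStepB (PySem.Set.ofList c)) dB).keys.Nodup ∧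
      (c'.foldl (pvStepA c) dA).items
        = (c'.foldl (pvStepB (PySem.Set.ofList c)) dB).items.map pvGroupVal := by
  induction c' generalizing dA dB with
  | nil => exact ⟨h1, h2⟩
  | cons tf rest ih =>
      obtain ⟨g1, g2⟩ := pv_inv_step c tf dA dB h1 h2
      exact ih _ _ g1 g2

theorem pv_inv_outer (ppi : List (List String))
    (dA : PySem.Dict String (PySem.Set String))
    (dB : PySem.Dict String (List (PySem.Set String)))
    (h1 : dB.keys.Nodup) (h2 : dA.items = dB.items.map pvGroupVal) :
    (ppi.foldl (fun d community => community.foldl (pvStepA community) d) dA).items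
      = (ppi.foldl (fun ix community => community.foldl (pvStepB (PySem.Set.ofList community)) ix) dB).items.map
          pvGroupVal := by
  induction ppi generalizing dA dB with
  | nil => exact h2
  | cons c rest ih =>
      obtain ⟨g1, g2⟩ := pv_inv_inner c c dA dB h1 h2
      exact ih _ _ g1 g2

-- ===== VERDICT (by name: the statement is the Claim_ definition above) =====
theorem create_tf_community_members_dict_spec : Claim_equal_create_tf_community_members_dict := by
  intro ppi _
  show _ = _
  unfold create_tf_community_members_dict create_tf_community_members_dict_alt
  exact pv_inv_outer ppi PySem.Dict.empty PySem.Dict.empty (by simp [PySem.Dict.keys, PySem.Dict.empty]) (by simp [PySem.Dict.empty])
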